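-- pv_equiv track=rewrite | github.com/vibeforge1111/vibeship-spark-intelligence | lib/advisor.py | _extract_agentic_queries
-- ===== SOURCE A (Python) =====
-- from typing import Any, Dict, List, Optional, Tuple
--
-- def _extract_agentic_queries(context: str, limit: int = 3) -> List[str]:
--     """Extract compact facet queries from context for lightweight agentic retrieval."""
--     tokens = []
--     for raw in context.lower().replace("/", " ").replace("_", " ").split():
--         t = raw.strip(".,:;()[]{}'\"`")
--         if len(t) < 4:
--             continue
--         if t in {"with", "from", "that", "this", "into", "have", "should", "would", "could", "where", "when", "while"}:
--             continue
--         if not any(ch.isalnum() for ch in t):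
--             continue
--         tokens.append(t)
--
--     seen = set()
--     facets: List[str] = []
--     for t in tokens:
--         if t in seen:
--             continue
--         seen.add(t)
--         facets.append(t)
--         if len(facets) >= limit:
--             break
--
--     return [f"{t} failure pattern and fix" for t in facets]
-- ===== SOURCE B (Python) =====
-- from typing import Any, Dict, List, Optional, Tuple
--
-- def _extract_agentic_queries(context: str, limit: int = 3) -> List[str]:
--     """Single fused pass: filter, dedup and format in one loop with early break."""
--     seen = set()
--     out: List[str] = []
--     for raw in context.lower().replace("/", " ").replace("_", " ").split():
--         t = raw.strip(".,:;()[]{}'\"`")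
--         if len(t) < 4:
--             continue
--         if t in {"with", "from", "that", "this", "into", "have", "should", "would", "could", "where", "when", "while"}:
--             continue
--         if not any(ch.isalnum() for ch in t):
--             continue
--         if t in seen:
--             continue
--         seen.add(t)
--         out.append(f"{t} failure pattern and fix")
--         if len(out) >= limit:
--             break
--     return out
-- ===== Notes on version B (the rewrite author's own statement) =====
-- stated objective: simpler
-- what changed: Replaced A's three sequential passes (build a filtered tokens list, then a dedup/limit loop, then a formatting list-comprehension) by one fused loop that filters, dedups, formats and early-breaks in a single pass with no intermediate list.
import Mathlib
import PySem

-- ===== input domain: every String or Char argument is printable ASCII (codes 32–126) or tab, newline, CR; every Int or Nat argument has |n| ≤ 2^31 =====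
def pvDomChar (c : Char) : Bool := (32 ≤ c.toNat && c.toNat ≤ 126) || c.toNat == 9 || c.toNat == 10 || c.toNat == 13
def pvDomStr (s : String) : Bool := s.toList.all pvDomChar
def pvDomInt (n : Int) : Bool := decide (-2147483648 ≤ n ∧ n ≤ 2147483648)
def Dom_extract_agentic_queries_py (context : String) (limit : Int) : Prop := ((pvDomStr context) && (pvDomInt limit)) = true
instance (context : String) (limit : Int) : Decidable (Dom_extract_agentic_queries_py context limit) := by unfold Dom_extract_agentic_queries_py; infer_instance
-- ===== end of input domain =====

-- B fuses A's three passes (filter to tokens, dedup/limit loop, formatting map) into one loop with early break; objective: simpler.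


-- shared literals of the two Pythons (the strip-character set and the stopword set literal)
def pvStripSet : String := ".,:;()[]{}'\"`"
def pvStop : List String := ["with", "from", "that", "this", "into", "have", "should", "would", "could", "where", "when", "while"]

-- ===== PORT A =====
-- A's second loop: dedup into facets with 'seen', break once len(facets) >= limit
def pvLoopA (limit : Int) : List String → PySem.Set String → List String → List String
  | [], _, facets => facets
  | t :: rest, seen, facets =>
    if PySem.Set.contains seen t then pvLoopA limit rest seen facets
    else
      let seen' := PySem.Set.add seen t
      let facets' := facets ++ [t]
      if limit ≤ (facets'.length : Int) then facets'
      else pvLoopA limit rest seen' facets'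

def extract_agentic_queries_py (context : String) (limit : Int) : List String :=
  let ws := PySem.Str.split₀ (PySem.Str.replace (PySem.Str.replace (PySem.Str.lower context) "/" " ") "_" " ")
  let tokens := ws.foldl (fun acc raw =>
    let t := PySem.Str.stripChars raw pvStripSet
    if PySem.Str.len t < 4 then acc
    else if pvStop.contains t then acc
    else if !(t.toList.any PySem.Chars.isalnum) then acc
    else acc ++ [t]) []
  let facets := pvLoopA limit tokens PySem.Set.empty []
  facets.map (fun t => t ++ " failure pattern and fix")

-- ===== PORT B =====
-- B's single fused loop: filter, dedup, format, early break
def pvLoopB (limit : Int) : List String → PySem.Set String → List String → List String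
  | [], _, out => out
  | raw :: rest, seen, out =>
    let t := PySem.Str.stripChars raw pvStripSet
    if PySem.Str.len t < 4 then pvLoopB limit rest seen out
    else if pvStop.contains t then pvLoopB limit rest seen out
    else if !(t.toList.any PySem.Chars.isalnum) then pvLoopB limit rest seen out
    else if PySem.Set.contains seen t then pvLoopB limit rest seen out
    else
      let seen' := PySem.Set.add seen t
      let out' := out ++ [t ++ " failure pattern and fix"]
      if limit ≤ (out'.length : Int) then out'
      else pvLoopB limit rest seen' out'

def extract_agentic_queries_py_alt (context : String) (limit : Int) : List String :=
  pvLoopB limit (PySem.Str.split₀ (PySem.Str.replace (PySem.Str.replace (PySem.Str.lower context) "/" " ") "_" " ")) PySem.Set.empty []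

-- ===== PRECONDITION & SPEC =====
def Spec_extract_agentic_queries_py (context : String) (limit : Int) (out : List String) : Prop := out = extract_agentic_queries_py_alt context limit
instance (context : String) (limit : Int) (out : List String) : Decidable (Spec_extract_agentic_queries_py context limit out) := by unfold Spec_extract_agentic_queries_py; infer_instance

-- ===== CLAIM (what is proved, stated in full; the proofs are below) =====
def Claim_equal_extract_agentic_queries_py : Prop := ∀ (context : String) (limit : Int), Dom_extract_agentic_queries_py context limit → Spec_extract_agentic_queries_py context limit (extract_agentic_queries_py context limit)

-- ===== LEMMAS AND PROOFS =====

-- the token filter both Pythons apply, as an Option-valued function (proof helper only)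
def pvTok (raw : String) : Option String :=
  let t := PySem.Str.stripChars raw pvStripSet
  if PySem.Str.len t < 4 then none
  else if pvStop.contains t then none
  else if !(t.toList.any PySem.Chars.isalnum) then none
  else some t

-- A's first-loop step appends pvTok's result
theorem pv_stepA_eq : (fun (acc : List String) raw =>
      let t := PySem.Str.stripChars raw pvStripSet
      if PySem.Str.len t < 4 then acc
      else if pvStop.contains t then acc
      else if !(t.toList.any PySem.Chars.isalnum) then acc
      else acc ++ [t]) = fun (acc : List String) raw => acc ++ (pvTok raw).elim [] (fun t => [t]) := by
  funext acc raw
  simp only [pvTok]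
  split_ifs <;> simp

-- A's first loop builds exactly the filterMap of pvTok
theorem pv_foldl_tokens (ws : List String) (acc : List String) :
    ws.foldl (fun acc raw => acc ++ (pvTok raw).elim [] (fun t => [t])) acc = acc ++ ws.filterMap pvTok := by
  induction ws generalizing acc with
  | nil => simp
  | cons raw rest ih =>
    cases h : pvTok raw <;> simp [List.foldl_cons, h, ih]

-- B's fused loop, one step, written through pvTok
theorem pv_loopB_cons (limit : Int) (raw : String) (rest : List String)
    (seen : PySem.Set String) (out : List String) :
    pvLoopB limit (raw :: rest) seen out =
      match pvTok raw with
      | none => pvLoopB limit rest seen out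
      | some t =>
        if PySem.Set.contains seen t then pvLoopB limit rest seen out
        else
          let out' := out ++ [t ++ " failure pattern and fix"]
          if limit ≤ (out'.length : Int) then out'
          else pvLoopB limit rest (PySem.Set.add seen t) out' := by
  simp only [pvLoopB, pvTok]
  split_ifs <;> simp_all

-- fusing the dedup loop through the filter and the formatting map
theorem pv_fuse (limit : Int) (ws : List String) (seen : PySem.Set String) (facets : List String) :
    pvLoopB limit ws seen (facets.map (fun t => t ++ " failure pattern and fix")) =
      (pvLoopA limit (ws.filterMap pvTok) seen facets).map (fun t => t ++ " failure pattern and fix") := by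
  induction ws generalizing seen facets with
  | nil => simp [pvLoopB, pvLoopA]
  | cons raw rest ih =>
    rw [pv_loopB_cons]
    cases h : pvTok raw with
    | none => simpa [List.filterMap_cons, h] using ih seen facets
    | some t =>
      simp only [List.filterMap_cons, h, pvLoopA]
      by_cases hs : t ∈ seen
      · simpa [hs] using ih seen facets
      · by_cases hl : limit ≤ (facets.length : Int) + 1
        · simp [hs, hl]
        · simpa [hs, hl] using ih (PySem.Set.add seen t) (facets ++ [t])

-- ===== VERDICT (by name: the statement is the Claim_ definition above) =====
theorem extract_agentic_queries_py_spec : Claim_equal_extract_agentic_queries_py := by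
  intro context limit _
  unfold Spec_extract_agentic_queries_py
  simp only [extract_agentic_queries_py, extract_agentic_queries_py_alt, pv_stepA_eq]
  rw [pv_foldl_tokens]
  simpa using (pv_fuse limit _ PySem.Set.empty []).symm
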